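-- pv_equiv track=rewrite | github.com/anton-rvk/vampire | scrape.py | parse_the_generation
-- ===== SOURCE A (Python) =====
-- def find_first_substring(sentence, substrings):
--     earliest_index = len(sentence) + 1
--     first_substring = None
--     for substring in substrings:
--         index = sentence.find(substring)
--         if index != -1 and index < earliest_index:
--             earliest_index = index
--             first_substring = substring
--     return first_substring
--
-- def parse_the_generation(sentence):
--     ordinals = ["first", "second", "third", "fourth", "fifth", "sixth", "seventh", "eighth", "ninth", "tenth", "eleventh", "twelfth"]
--     ordinal_numerals = ["1st", "2nd", "3rd", "4th", "5th", "6th", "7th", "8th", "9th", "10th", "11th", "12th"]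
--
--     possible_gens = ordinal_numerals + ordinals
--
--     map = {}
--
--     for count, ordinal in enumerate(zip(ordinals, ordinal_numerals)):
--         map.update(dict.fromkeys(ordinal, count+1))
--
--
--     gen = find_first_substring(sentence, substrings=possible_gens)
--
--     if gen:
--         return map[gen]
--     return None
-- ===== SOURCE B (Python) =====
-- # One left-to-right positional pass over the sentence instead of 24 full find() scans:
-- # at each suffix, check whether any candidate starts there and return its mapped number.
--
-- _TABLE = [
--     ("1st", 1), ("2nd", 2), ("3rd", 3), ("4th", 4), ("5th", 5), ("6th", 6),
--     ("7th", 7), ("8th", 8), ("9th", 9), ("10th", 10), ("11th", 11), ("12th", 12),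
--     ("first", 1), ("second", 2), ("third", 3), ("fourth", 4), ("fifth", 5),
--     ("sixth", 6), ("seventh", 7), ("eighth", 8), ("ninth", 9), ("tenth", 10),
--     ("eleventh", 11), ("twelfth", 12),
-- ]
--
-- def parse_the_generation(sentence):
--     suffix = sentence
--     while suffix:
--         for cand, num in _TABLE:
--             if suffix.startswith(cand):
--                 return num
--         suffix = suffix[1:]
--     return None
-- ===== Notes on version B (the rewrite author's own statement) =====
-- stated objective: alternative
-- what changed: Replaces 24 independent whole-string find() scans plus a min-index fold and a dict lookup by a single left-to-right positional pass that returns the mapped number of the first candidate that starts at the earliest position.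
import Mathlib
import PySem

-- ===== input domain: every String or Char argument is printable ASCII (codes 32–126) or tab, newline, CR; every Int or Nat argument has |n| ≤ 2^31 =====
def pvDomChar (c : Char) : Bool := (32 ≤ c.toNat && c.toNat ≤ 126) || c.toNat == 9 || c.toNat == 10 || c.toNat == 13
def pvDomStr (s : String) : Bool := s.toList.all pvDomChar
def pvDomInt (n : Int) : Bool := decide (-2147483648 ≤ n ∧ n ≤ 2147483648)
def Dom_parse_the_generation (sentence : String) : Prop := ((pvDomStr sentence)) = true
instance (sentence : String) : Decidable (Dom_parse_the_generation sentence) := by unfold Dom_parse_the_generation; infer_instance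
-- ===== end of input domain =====

-- B replaces A's 24 whole-string find() scans + min-index fold + dict lookup by one
-- left-to-right positional pass returning the first candidate match (objective: alternative).

-- ===== PORT A =====
def pvOrdinals : List String :=
  ["first", "second", "third", "fourth", "fifth", "sixth", "seventh", "eighth",
   "ninth", "tenth", "eleventh", "twelfth"]
def pvOrdinalNumerals : List String :=
  ["1st", "2nd", "3rd", "4th", "5th", "6th", "7th", "8th", "9th", "10th", "11th", "12th"]
def pvPossibleGens : List String := pvOrdinalNumerals ++ pvOrdinals
-- the dict A builds: for count, (word, numeral) insert word then numeral with value count+1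
def pvMap : PySem.Dict String Int :=
  (PySem.List.enumerate (pvOrdinals.zip pvOrdinalNumerals)).foldl
    (fun d p => (d.insert p.2.1 (p.1 + 1)).insert p.2.2 (p.1 + 1)) PySem.Dict.empty

def find_first_substring (sentence : String) (substrings : List String) : Option String :=
  (substrings.foldl
    (fun (st : Int × Option String) sub =>
      let index := PySem.Str.find sentence sub
      if index ≠ -1 ∧ index < st.1 then (index, some sub) else st)
    (((PySem.Str.len sentence : Int) + 1), none)).2

def parse_the_generation (sentence : String) : Option Int :=
  match find_first_substring sentence pvPossibleGens with
  | some g =>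
      if PySem.Str.len g ≠ 0 then
        match PySem.Dict.get? pvMap g with
        | some v => some v
        | none => none  -- unreachable: g is always a key of the map (Python would raise KeyError)
      else none
  | none => none

-- ===== PORT B =====
def pvAltTable : List (String × Int) :=
  [("1st", 1), ("2nd", 2), ("3rd", 3), ("4th", 4), ("5th", 5), ("6th", 6),
   ("7th", 7), ("8th", 8), ("9th", 9), ("10th", 10), ("11th", 11), ("12th", 12),
   ("first", 1), ("second", 2), ("third", 3), ("fourth", 4), ("fifth", 5),
   ("sixth", 6), ("seventh", 7), ("eighth", 8), ("ninth", 9), ("tenth", 10),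
   ("eleventh", 11), ("twelfth", 12)]

-- the `while suffix:` loop of Source B, walking the suffixes of the sentence
def pvAltScan : List Char → Option Int
  | [] => none
  | c :: rest =>
    match pvAltTable.find? (fun p => PySem.Chars.startswith (c :: rest) p.1.toList) with
    | some p => some p.2
    | none => pvAltScan rest

def parse_the_generation_alt (sentence : String) : Option Int :=
  pvAltScan sentence.toList

-- ===== PRECONDITION & SPEC =====
def Spec_parse_the_generation (sentence : String) (out : Option Int) : Prop := out = parse_the_generation_alt sentence
instance (sentence : String) (out : Option Int) : Decidable (Spec_parse_the_generation sentence out) := by unfold Spec_parse_the_generation; infer_instance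

-- ===== CLAIM (what is proved, stated in full; the proofs are below) =====
def Claim_equal_parse_the_generation : Prop := ∀ (sentence : String), Dom_parse_the_generation sentence → Spec_parse_the_generation sentence (parse_the_generation sentence)

-- ===== LEMMAS AND PROOFS =====

-- concrete facts about the fixed tables, by decide
lemma pvKeys_eq : pvPossibleGens = pvAltTable.map Prod.fst := by decide
lemma pvNoPrefix : ∀ p ∈ pvAltTable, ∀ q ∈ pvAltTable,
    p.1.toList.isPrefixOf q.1.toList = true → p = q := by decide
lemma pvKeysNonempty : ∀ p ∈ pvAltTable, p.1.toList ≠ [] := by decide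
lemma pvLookup : ∀ p ∈ pvAltTable,
    PySem.Str.len p.1 ≠ 0 ∧ PySem.Dict.get? pvMap p.1 = some p.2 := by decide

-- no two table keys can both start at the same position
lemma pvUnique {t : List Char} {p q : String × Int} (hp : p ∈ pvAltTable) (hq : q ∈ pvAltTable)
    (h1 : p.1.toList <+: t) (h2 : q.1.toList <+: t) : p = q := by
  rcases List.prefix_or_prefix_of_prefix h1 h2 with h | h
  · exact pvNoPrefix p hp q hq (List.isPrefixOf_iff_prefix.mpr h)
  · exact (pvNoPrefix q hq p hp (List.isPrefixOf_iff_prefix.mpr h)).symm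

lemma pvAltScan_none (l : List Char)
    (h : ∀ p ∈ pvAltTable, ¬ (p.1.toList <:+: l)) : pvAltScan l = none := by
  induction l with
  | nil => rfl
  | cons c rest ih =>
    have hfind : pvAltTable.find? (fun p => PySem.Chars.startswith (c :: rest) p.1.toList) = none := by
      rw [List.find?_eq_none]
      intro p hp
      simp only [PySem.Chars.startswith_iff]
      intro hpre
      exact h p hp hpre.isInfix
    simp only [pvAltScan, hfind]
    exact ih (fun p hp hinf => h p hp (hinf.trans (List.suffix_cons c rest).isInfix))

lemma pvAltScan_hit : ∀ (i : Nat) (l : List Char) (p : String × Int), p ∈ pvAltTable →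
    p.1.toList <+: l.drop i →
    (∀ j < i, ∀ q ∈ pvAltTable, ¬ q.1.toList <+: l.drop j) →
    pvAltScan l = some p.2 := by
  intro i
  induction i with
  | zero =>
    intro l p hp hpre _
    simp only [List.drop_zero] at hpre
    obtain ⟨c, rest, rfl⟩ : ∃ c rest, l = c :: rest := by
      cases l with
      | nil => exact absurd (List.prefix_nil.mp hpre) (pvKeysNonempty p hp)
      | cons c rest => exact ⟨c, rest, rfl⟩
    rcases hfind : pvAltTable.find? (fun q => PySem.Chars.startswith (c :: rest) q.1.toList) with _ | q
    · have := List.find?_eq_none.mp hfind p hp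
      simp [PySem.Chars.startswith_iff, hpre] at this
    · have hqmem := List.mem_of_find?_eq_some hfind
      have hqpre := List.find?_some hfind
      simp only [PySem.Chars.startswith_iff] at hqpre
      have : q = p := pvUnique hqmem hp hqpre hpre
      simp [pvAltScan, hfind, this]
  | succ i ih =>
    intro l p hp hpre hmin
    obtain ⟨c, rest, rfl⟩ : ∃ c rest, l = c :: rest := by
      cases l with
      | nil =>
        rw [List.drop_nil] at hpre
        exact absurd (List.prefix_nil.mp hpre) (pvKeysNonempty p hp)
      | cons c rest => exact ⟨c, rest, rfl⟩
    have hfind : pvAltTable.find? (fun q => PySem.Chars.startswith (c :: rest) q.1.toList) = none := by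
      rw [List.find?_eq_none]
      intro q hq
      simp only [PySem.Chars.startswith_iff]
      intro hqpre
      exact hmin 0 (Nat.succ_pos i) q hq (by simpa using hqpre)
    simp only [pvAltScan, hfind]
    exact ih rest p hp (by simpa using hpre)
      (fun j hj q hq hqpre => hmin (j + 1) (by omega) q hq (by simpa using hqpre))

-- invariant of A's min-index fold (induction over the candidate list, accumulator generalised)
lemma pvFfs_inv (s : String) : ∀ (cs : List String) (e : Int) (b : Option String),
    (cs.foldl
      (fun (st : Int × Option String) sub =>
        let index := PySem.Str.find s sub
        if index ≠ -1 ∧ index < st.1 then (index, some sub) else st)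
      (e, b) = (e, b) ∧ ∀ c ∈ cs, PySem.Str.find s c = -1 ∨ e ≤ PySem.Str.find s c)
    ∨ (∃ c ∈ cs,
        (cs.foldl
          (fun (st : Int × Option String) sub =>
            let index := PySem.Str.find s sub
            if index ≠ -1 ∧ index < st.1 then (index, some sub) else st)
          (e, b)) = (PySem.Str.find s c, some c) ∧
        PySem.Str.find s c ≠ -1 ∧ PySem.Str.find s c < e ∧
        ∀ c' ∈ cs, PySem.Str.find s c' = -1 ∨ PySem.Str.find s c ≤ PySem.Str.find s c') := by
  intro cs
  induction cs with
  | nil => intro e b; left; simp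
  | cons c cs ih =>
    intro e b
    simp only [List.foldl_cons]
    by_cases hc : PySem.Str.find s c ≠ -1 ∧ PySem.Str.find s c < e
    · rw [if_pos hc]
      rcases ih (PySem.Str.find s c) (some c) with ⟨heq, hall⟩ | ⟨c2, hc2, heq, hne2, hlt2, hall2⟩
      · right
        refine ⟨c, List.mem_cons_self, heq, hc.1, hc.2, ?_⟩
        intro c' hc'
        rcases List.mem_cons.mp hc' with rfl | hc'
        · exact Or.inr le_rfl
        · rcases hall c' hc' with h | h
          · exact Or.inl h
          · exact Or.inr h
      · right
        refine ⟨c2, List.mem_cons_of_mem _ hc2, heq, hne2, lt_trans hlt2 hc.2, ?_⟩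
        intro c' hc'
        rcases List.mem_cons.mp hc' with rfl | hc'
        · exact Or.inr (le_of_lt hlt2)
        · exact hall2 c' hc'
    · rw [if_neg hc]
      have hcor : PySem.Str.find s c = -1 ∨ e ≤ PySem.Str.find s c := by
        rcases eq_or_ne (PySem.Str.find s c) (-1) with h | h
        · exact Or.inl h
        · exact Or.inr (le_of_not_gt fun hlt => hc ⟨h, hlt⟩)
      rcases ih e b with ⟨heq, hall⟩ | ⟨c2, hc2, heq, hne2, hlt2, hall2⟩
      · left
        refine ⟨heq, ?_⟩
        intro c' hc'
        rcases List.mem_cons.mp hc' with rfl | hc'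
        · by_cases h1 : PySem.Str.find s c' = -1
          · exact Or.inl h1
          · rcases hcor with h2 | h2
            · exact absurd h2 h1
            · exact Or.inr h2
        · exact hall c' hc'
      · right
        refine ⟨c2, List.mem_cons_of_mem _ hc2, heq, hne2, hlt2, ?_⟩
        intro c' hc'
        rcases List.mem_cons.mp hc' with rfl | hc'
        · by_cases h1 : PySem.Str.find s c' = -1
          · exact Or.inl h1
          · rcases hcor with h2 | h2
            · exact absurd h2 h1
            · exact Or.inr (le_of_lt (lt_of_lt_of_le hlt2 h2))
        · exact hall2 c' hc'

lemma pv_main (s : String) : parse_the_generation s = parse_the_generation_alt s := by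
  unfold parse_the_generation parse_the_generation_alt find_first_substring
  rcases pvFfs_inv s pvPossibleGens ((PySem.Str.len s : Int) + 1) none with
    ⟨heq, hall⟩ | ⟨c, hcmem, heq, hne, _, hmin⟩
  · -- no candidate occurs: A returns none; B's scan finds nothing
    rw [heq]
    have hnone : pvAltScan s.toList = none := by
      apply pvAltScan_none
      intro p hp hinf
      have hmem : p.1 ∈ pvPossibleGens := by
        rw [pvKeys_eq]; exact List.mem_map_of_mem hp
      rcases hall p.1 hmem with h | h
      · rw [PySem.Str.find_eq, PySem.Chars.find_eq_neg_one_iff] at h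
        exact h hinf
      · have hle : PySem.Str.find s p.1 ≤ (s.toList.length : Int) := by
          rw [PySem.Str.find_eq]; exact PySem.Chars.find_le_length _ _
        have : (PySem.Str.len s : Int) = (s.toList.length : Int) := by
          rw [PySem.Str.len_eq]
        omega
    rw [hnone]
  · -- some candidate c wins at index e0 := find s c ≥ 0
    rw [heq]
    simp only []
    have h0 : (0 : Int) ≤ PySem.Str.find s c := by
      have := PySem.Chars.neg_one_le_find s.toList c.toList
      rw [PySem.Str.find_eq] at *
      omega
    -- the matching table entry for c
    have : c ∈ pvAltTable.map Prod.fst := by rw [← pvKeys_eq]; exact hcmem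
    obtain ⟨p, hp, hpc⟩ := List.mem_map.mp this
    obtain ⟨hlen, hget⟩ := pvLookup p hp
    rw [hpc] at hlen hget
    rw [if_pos hlen, hget]
    -- B finds p at position (find s c).toNat
    set i0 : Nat := (PySem.Chars.find s.toList c.toList).toNat with hi0
    have hfc : PySem.Str.find s c = PySem.Chars.find s.toList c.toList := PySem.Str.find_eq s c
    have h0' : (0 : Int) ≤ PySem.Chars.find s.toList c.toList := by rw [← hfc]; exact h0
    obtain ⟨hpre, hfirst⟩ := PySem.Chars.find_spec (s := s.toList) (sub := c.toList) h0'
    have hscan : pvAltScan s.toList = some p.2 := by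
      apply pvAltScan_hit i0 s.toList p hp
      · rw [hpc]; exact hpre
      · intro j hj q hq hqpre
        have hqmem : q.1 ∈ pvPossibleGens := by
          rw [pvKeys_eq]; exact List.mem_map_of_mem hq
        have hqinf : q.1.toList <:+: s.toList :=
          hqpre.isInfix.trans (s.toList.drop_suffix j).isInfix
        have hqfind0 : (0:Int) ≤ PySem.Chars.find s.toList q.1.toList :=
          (PySem.Chars.find_nonneg_iff s.toList q.1.toList).mpr hqinf
        have hqle : PySem.Chars.find s.toList q.1.toList ≤ (j : Int) := by
          obtain ⟨_, hqfirst⟩ := PySem.Chars.find_spec (s := s.toList) (sub := q.1.toList) hqfind0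
          by_contra hgt
          exact hqfirst j (by omega) hqpre
        rcases hmin q.1 hqmem with h | h
        · rw [PySem.Str.find_eq] at h; omega
        · rw [PySem.Str.find_eq, PySem.Str.find_eq] at h
          have : (j : Int) < PySem.Chars.find s.toList c.toList := by omega
          omega
    rw [hscan]

-- ===== VERDICT (by name: the statement is the Claim_ definition above) =====
theorem parse_the_generation_spec : Claim_equal_parse_the_generation := by
  intro sentence _
  unfold Spec_parse_the_generation
  exact pv_main sentence
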